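-- pv_equiv track=rewrite | github.com/charlesfg/term.ooo-solver | guest5word.py | check
-- ===== SOURCE A (Python) =====
-- def check(test_chars, word_str, relations):
--     """
--         Given a set of test characteres it will test if they relates to the word_str
--         returning trues if this relation holds.
--
--         Ex.  check('ab',"colegio","in") ==> False
--              check('ab',"colegio","out") ==> True
--              check('ab',"colegio","biro") ==> TypeError
--         """
--     if relations == "in":
--         for i in test_chars:
--             if i not in word_str:
--                 return False
--         return True
--     if relations == "out":
--         for i in test_chars:
--             if i in word_str:
--                 return False
--         return True
--     raise TypeError("relations should be in/out")
-- ===== SOURCE B (Python) =====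
-- def check(test_chars, word_str, relations):
--     if relations != "in" and relations != "out":
--         raise TypeError("relations should be in/out")
--     remaining = set(test_chars)
--     n = len(remaining)
--     for ch in word_str:
--         remaining.discard(ch)
--     if relations == "in":
--         return len(remaining) == 0
--     return len(remaining) == n
-- ===== Notes on version B (the rewrite author's own statement) =====
-- stated objective: alternative
-- what changed: Inverts the traversal: instead of scanning test_chars with an early-return membership loop over word_str, B makes one pass over word_str discarding each seen char from the set of test chars, then decides both relations by comparing the surviving count (0 for "in", unchanged for "out").
import Mathlib
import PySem

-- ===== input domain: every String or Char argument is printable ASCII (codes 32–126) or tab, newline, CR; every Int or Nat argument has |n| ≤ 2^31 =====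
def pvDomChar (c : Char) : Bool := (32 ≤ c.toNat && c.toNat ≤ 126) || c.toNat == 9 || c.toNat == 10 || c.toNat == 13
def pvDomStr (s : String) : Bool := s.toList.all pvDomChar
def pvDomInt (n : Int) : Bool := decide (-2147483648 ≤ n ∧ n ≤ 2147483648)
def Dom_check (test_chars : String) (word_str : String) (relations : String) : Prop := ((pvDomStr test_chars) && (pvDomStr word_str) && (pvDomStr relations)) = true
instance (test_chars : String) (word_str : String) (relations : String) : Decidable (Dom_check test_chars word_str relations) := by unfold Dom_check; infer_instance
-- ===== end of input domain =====

-- B inverts the traversal: one pass over word_str discarding seen chars from set(test_chars),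
-- then both relations are decided by the surviving count; objective: alternative.

-- ===== PORT A =====
-- the 'for i in test_chars: if i not in word_str: return False' loop (early return)
def checkLoopIn : List Char → List Char → Bool
  | [], _ => true
  | c :: rest, w => if ¬ (c ∈ w) then false else checkLoopIn rest w

-- the 'for i in test_chars: if i in word_str: return False' loop (early return)
def checkLoopOut : List Char → List Char → Bool
  | [], _ => true
  | c :: rest, w => if c ∈ w then false else checkLoopOut rest w

def check (test_chars : String) (word_str : String) (relations : String) : Bool :=
  if relations = "in" then checkLoopIn test_chars.toList word_str.toList
  else if relations = "out" then checkLoopOut test_chars.toList word_str.toList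
  else false  -- unreachable under Pre_check (Python raises TypeError)

-- ===== PORT B =====
def check_alt (test_chars : String) (word_str : String) (relations : String) : Bool :=
  if relations ≠ "in" ∧ relations ≠ "out" then false  -- unreachable under Pre_check (TypeError)
  else
    let remaining := PySem.Set.ofList test_chars.toList
    let n := PySem.Set.len remaining
    let remaining := word_str.toList.foldl PySem.Set.discard remaining
    if relations = "in" then PySem.Set.len remaining == 0
    else PySem.Set.len remaining == n

-- ===== PRECONDITION & SPEC =====
-- Pre_ excludes exactly the inputs on which both A and B raise TypeError (relations not "in"/"out").
def Pre_check (test_chars : String) (word_str : String) (relations : String) : Prop :=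
  relations = "in" ∨ relations = "out"
instance (test_chars : String) (word_str : String) (relations : String) : Decidable (Pre_check test_chars word_str relations) := by unfold Pre_check; infer_instance

def pvWitness_check : String × String × String := ("ab", "colegio", "out")

def Spec_check (test_chars : String) (word_str : String) (relations : String) (out : Bool) : Prop := out = check_alt test_chars word_str relations
instance (test_chars : String) (word_str : String) (relations : String) (out : Bool) : Decidable (Spec_check test_chars word_str relations out) := by unfold Spec_check; infer_instance

-- ===== CLAIM (what is proved, stated in full; the proofs are below) =====
def Claim_equal_check : Prop := ∀ (test_chars : String) (word_str : String) (relations : String), Dom_check test_chars word_str relations → Pre_check test_chars word_str relations → Spec_check test_chars word_str relations (check test_chars word_str relations)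

-- ===== LEMMAS AND PROOFS =====

-- A's early-return "in"-loop answers: every char of the list is in w
theorem checkLoopIn_eq_all (l w : List Char) :
    checkLoopIn l w = decide (∀ c ∈ l, c ∈ w) := by
  induction l with
  | nil => simp [checkLoopIn]
  | cons c rest ih => by_cases h : c ∈ w <;> simp [checkLoopIn, h, ih]

-- A's early-return "out"-loop answers: no char of the list is in w
theorem checkLoopOut_eq_all (l w : List Char) :
    checkLoopOut l w = decide (∀ c ∈ l, c ∉ w) := by
  induction l with
  | nil => simp [checkLoopOut]
  | cons c rest ih => by_cases h : c ∈ w <;> simp [checkLoopOut, h, ih]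

-- membership in the result of B's discard-fold over the word
theorem mem_foldl_discard (w : List Char) (s : PySem.Set Char) (x : Char) :
    x ∈ w.foldl PySem.Set.discard s ↔ x ∈ s ∧ x ∉ w := by
  induction w generalizing s with
  | nil => simp
  | cons c w ih =>
      simp only [List.foldl_cons, ih, PySem.Set.mem_discard, List.mem_cons]
      tauto

-- the discard-fold preserves distinctness
theorem nodup_foldl_discard (w : List Char) (s : PySem.Set Char) (h : s.Nodup) :
    (w.foldl PySem.Set.discard s).Nodup := by
  induction w generalizing s with
  | nil => exact h
  | cons c w ih => exact ih _ (PySem.Set.nodup_discard _ _ h)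

-- the fold's length is unchanged iff no element of s occurs in w
theorem foldl_discard_length_eq (w : List Char) (s : PySem.Set Char) (h : s.Nodup) :
    (w.foldl PySem.Set.discard s).length = s.length ↔ ∀ x ∈ s, x ∉ w := by
  constructor
  · intro hlen x hx hxw
    have hsub : (w.foldl PySem.Set.discard s) ⊆ s.erase x := by
      intro y hy
      rw [mem_foldl_discard] at hy
      exact (List.mem_erase_of_ne (by rintro rfl; exact hy.2 hxw)).mpr hy.1
    have hnd := nodup_foldl_discard w s h
    have hle : (w.foldl PySem.Set.discard s).length ≤ (s.erase x).length :=
      (List.Nodup.subperm hnd hsub).length_le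
    rw [List.length_erase_of_mem hx] at hle
    have hpos := List.length_pos_of_mem hx
    omega
  · intro hall
    have : ∀ y, y ∈ w.foldl PySem.Set.discard s ↔ y ∈ s := by
      intro y
      rw [mem_foldl_discard]
      exact ⟨fun h => h.1, fun hy => ⟨hy, hall y hy⟩⟩
    have h1 : List.Subperm (w.foldl PySem.Set.discard s) s :=
      List.Nodup.subperm (nodup_foldl_discard w s h) (fun y hy => (this y).mp hy)
    have h2 : List.Subperm s (w.foldl PySem.Set.discard s) :=
      List.Nodup.subperm h (fun y hy => (this y).mpr hy)
    exact Nat.le_antisymm h1.length_le h2.length_le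

-- the fold is empty iff every element of s occurs in w
theorem foldl_discard_eq_nil (w : List Char) (s : PySem.Set Char) :
    (w.foldl PySem.Set.discard s) = [] ↔ ∀ x ∈ s, x ∈ w := by
  rw [List.eq_nil_iff_forall_not_mem]
  constructor
  · intro hnil x hx
    by_contra hxw
    exact hnil x ((mem_foldl_discard w s x).mpr ⟨hx, hxw⟩)
  · intro hall x hx
    rw [mem_foldl_discard] at hx
    exact hx.2 (hall x hx.1)

-- ===== VERDICT (by name: the statement is the Claim_ definition above) =====
theorem check_spec : Claim_equal_check := by
  intro tc ws rel _ hpre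
  unfold Spec_check
  rcases hpre with h | h <;> subst h
  · have hA : check tc ws "in" = checkLoopIn tc.toList ws.toList := by simp [check]
    have hB : check_alt tc ws "in" =
        (PySem.Set.len (ws.toList.foldl PySem.Set.discard (PySem.Set.ofList tc.toList)) == 0) := by
      simp [check_alt]
    rw [hA, hB, checkLoopIn_eq_all, Bool.eq_iff_iff]
    simp only [PySem.Set.len, beq_iff_eq, Int.natCast_eq_zero, List.length_eq_zero_iff,
      decide_eq_true_eq]
    rw [foldl_discard_eq_nil]
    simp [PySem.Set.mem_ofList]
  · have hA : check tc ws "out" = checkLoopOut tc.toList ws.toList := by simp [check]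
    have hB : check_alt tc ws "out" =
        (PySem.Set.len (ws.toList.foldl PySem.Set.discard (PySem.Set.ofList tc.toList)) ==
          PySem.Set.len (PySem.Set.ofList tc.toList)) := by
      simp [check_alt]
    rw [hA, hB, checkLoopOut_eq_all, Bool.eq_iff_iff]
    simp only [PySem.Set.len, beq_iff_eq, Int.natCast_inj, decide_eq_true_eq]
    rw [foldl_discard_length_eq _ _ (PySem.Set.nodup_ofList _)]
    simp [PySem.Set.mem_ofList]
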